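-- pv_equiv track=rewrite | github.com/Beansdebanjan/Indigo-financial-analysis | fix_templates.py | find_templates
-- ===== SOURCE A (Python) =====
-- def find_templates(text):
--     templates = []
--     i = 0
--     while i < len(text):
--         idx = text.find('${', i)
--         if idx == -1:
--             break
--
--         # Found ${, now find balancing }
--         brace_count = 1
--         j = idx + 2
--         in_string = False
--         string_char = ''
--
--         while j < len(text):
--             c = text[j]
--             if not in_string:
--                 if c in ('"', "'", '`'):
--                     in_string = True
--                     string_char = c
--                 elif c == '{':
--                     brace_count += 1
--                 elif c == '}':
--                     brace_count -= 1
--                     if brace_count == 0: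
--                         templates.append((idx, j + 1, text[idx:j+1]))
--                         break
--             else:
--                 raw_j = j
--                 if c == string_char and text[j-1] != '\\':
--                     in_string = False
--             j += 1
--         i = max(idx + 1, j)
--     return templates
-- ===== SOURCE B (Python) =====
-- def find_templates(text):
--     templates = []
--     n = len(text)
--     depth = 0
--     in_string = False
--     string_char = ''
--     start = 0
--     i = 0
--     while i < n:
--         if depth == 0:
--             if text.startswith('${', i):
--                 depth = 1
--                 in_string = False
--                 start = i
--                 i += 2
--             else:
--                 i += 1
--         else:
--             c = text[i]
--             if in_string:
--                 if c == string_char and text[i-1] != '\\':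
--                     in_string = False
--             elif c in ('"', "'", '`'):
--                 in_string = True
--                 string_char = c
--             elif c == '{':
--                 depth += 1
--             elif c == '}':
--                 depth -= 1
--                 if depth == 0:
--                     templates.append((start, i + 1, text[start:i+1]))
--             i += 1
--     return templates
-- ===== Notes on version B (the rewrite author's own statement) =====
-- stated objective: idiomatic
-- what changed: Replaced A's nested loops (an outer scan that calls str.find for the next dollar-brace opener plus an inner balancing loop with its own local state) by a single flat while-loop state machine over one index with a depth counter, emitting a span whenever depth returns to 0.
import Mathlib
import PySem

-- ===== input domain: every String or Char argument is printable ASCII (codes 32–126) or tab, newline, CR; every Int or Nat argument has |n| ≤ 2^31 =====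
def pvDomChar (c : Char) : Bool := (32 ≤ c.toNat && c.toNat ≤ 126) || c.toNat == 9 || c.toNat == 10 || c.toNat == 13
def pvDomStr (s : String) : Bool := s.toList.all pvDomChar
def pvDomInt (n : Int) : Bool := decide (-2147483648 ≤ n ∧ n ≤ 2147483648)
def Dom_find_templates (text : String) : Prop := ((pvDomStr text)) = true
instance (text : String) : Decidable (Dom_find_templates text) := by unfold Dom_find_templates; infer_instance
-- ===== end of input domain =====

-- B replaces A's nested loops (a str.find-based outer scan + inner balancing loop) by one flat single-pass
-- state machine with a depth counter (objective: more idiomatic; same O(n) cost).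

-- ===== PORT A =====
-- shared helper: text[a:b] for the in-range Nat bounds both Pythons use (exact there)
def pvSlice (cs : List Char) (a b : Nat) : String := String.ofList ((cs.drop a).take (b - a))

-- does '${' occur at position i? (used by A's find and by B's startswith('${', i); exact)
def pvMatchAt (cs : List Char) (i : Nat) : Bool :=
  cs.getD i ' ' == '$' && decide (i + 1 < cs.length) && cs.getD (i + 1) ' ' == '{'

-- port of `text.find('${', i)` for 0 ≤ i: first position ≥ i where '${' occurs; none = -1. Exact.
def findDB (cs : List Char) (i : Nat) : Option Nat :=
  if i < cs.length then
    if pvMatchAt cs i then some i else findDB cs (i + 1)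
  else none
termination_by cs.length - i

-- A's inner while loop (c = text[j] inlined): returns the position of the balancing '}',
-- none = ran off the end (the unterminated template is dropped)
def innerA (cs : List Char) (j : Nat) (bc : Int) (ins : Bool) (sc : Char) : Option Nat :=
  if j < cs.length then
    if ins = false then
      if cs.getD j ' ' = '"' ∨ cs.getD j ' ' = '\'' ∨ cs.getD j ' ' = '`' then
        innerA cs (j + 1) bc true (cs.getD j ' ')
      else if cs.getD j ' ' = '{' then innerA cs (j + 1) (bc + 1) ins sc
      else if cs.getD j ' ' = '}' then
        if bc - 1 = 0 then some j
        else innerA cs (j + 1) (bc - 1) ins sc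
      else innerA cs (j + 1) bc ins sc
    else
      if cs.getD j ' ' = sc ∧ cs.getD (j - 1) ' ' ≠ '\\' then innerA cs (j + 1) bc false sc
      else innerA cs (j + 1) bc ins sc
  else none
termination_by cs.length - j

-- needed by outerA's termination proof (find never returns a position left of its start)
theorem findDB_ge (cs : List Char) : ∀ (k i idx : Nat), cs.length - i ≤ k →
    findDB cs i = some idx → i ≤ idx := by
  intro k
  induction k with
  | zero =>
    intro i idx hk h
    rw [findDB] at h
    have : ¬ i < cs.length := by omega
    simp [this] at h
  | succ k ih =>
    intro i idx hk h
    rw [findDB] at h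
    by_cases hi : i < cs.length
    · simp only [hi, if_true] at h
      by_cases hm : pvMatchAt cs i
      · simp [hm] at h; omega
      · simp only [hm] at h
        have := ih (i + 1) idx (by omega) h
        omega
    · simp [hi] at h

-- A's outer while loop (i advances as Python's `i = max(idx + 1, j)` does)
def outerA (cs : List Char) (i : Nat) (acc : List (Int × Int × String)) :
    List (Int × Int × String) :=
  if i < cs.length then
    match hidx : findDB cs i with
    | none => acc
    | some idx =>
      match innerA cs (idx + 2) 1 false ' ' with
      | some j =>
          outerA cs (max (idx + 1) j)
            (acc ++ [((idx : Int), ((j + 1 : Nat) : Int), pvSlice cs idx (j + 1))])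
      | none => outerA cs (max (idx + 1) cs.length) acc
  else acc
termination_by cs.length - i
decreasing_by
  · rename_i hi
    have := findDB_ge cs (cs.length - i) i idx le_rfl hidx; omega
  · rename_i hi
    omega

def find_templates (text : String) : List (Int × Int × String) := outerA text.toList 0 []

-- ===== PORT B =====
-- the single flat loop of Source B, carried state = (i, depth, in_string, string_char, start, acc)
def scanB (cs : List Char) (i : Nat) (depth : Int) (ins : Bool) (sc : Char) (start : Nat)
    (acc : List (Int × Int × String)) : List (Int × Int × String) :=
  if i < cs.length then
    if depth = 0 then
      if pvMatchAt cs i then scanB cs (i + 2) 1 false sc i acc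
      else scanB cs (i + 1) 0 ins sc start acc
    else
      if ins then
        if cs.getD i ' ' = sc ∧ cs.getD (i - 1) ' ' ≠ '\\' then
          scanB cs (i + 1) depth false sc start acc
        else scanB cs (i + 1) depth ins sc start acc
      else if cs.getD i ' ' = '"' ∨ cs.getD i ' ' = '\'' ∨ cs.getD i ' ' = '`' then
        scanB cs (i + 1) depth true (cs.getD i ' ') start acc
      else if cs.getD i ' ' = '{' then scanB cs (i + 1) (depth + 1) ins sc start acc
      else if cs.getD i ' ' = '}' then
        if depth - 1 = 0 then
          scanB cs (i + 1) 0 ins sc start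
            (acc ++ [((start : Int), ((i + 1 : Nat) : Int), pvSlice cs start (i + 1))])
        else scanB cs (i + 1) (depth - 1) ins sc start acc
      else scanB cs (i + 1) depth ins sc start acc
  else acc
termination_by cs.length - i

def find_templates_alt (text : String) : List (Int × Int × String) :=
  scanB text.toList 0 0 false ' ' 0 []

-- ===== PRECONDITION & SPEC =====
def Spec_find_templates (text : String) (out : List (Int × Int × String)) : Prop := out = find_templates_alt text
instance (text : String) (out : List (Int × Int × String)) : Decidable (Spec_find_templates text out) := by unfold Spec_find_templates; infer_instance

-- ===== CLAIM (what is proved, stated in full; the proofs are below) =====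
def Claim_equal_find_templates : Prop := ∀ (text : String), Dom_find_templates text → Spec_find_templates text (find_templates text)

-- ===== LEMMAS AND PROOFS =====

-- searching phase: while depth = 0, B's scan advances exactly to the next '${' (A's find)
theorem scanB_zero (cs : List Char) : ∀ (k i : Nat) (ins : Bool) (sc : Char) (start : Nat)
    (acc : List (Int × Int × String)), cs.length - i ≤ k →
    scanB cs i 0 ins sc start acc =
      match findDB cs i with
      | none => acc
      | some idx => scanB cs (idx + 2) 1 false sc idx acc := by
  intro k
  induction k with
  | zero =>
    intro i ins sc start acc hk
    have hi : ¬ i < cs.length := by omega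
    rw [scanB, findDB]; simp [hi]
  | succ k ih =>
    intro i ins sc start acc hk
    by_cases hi : i < cs.length
    · rw [scanB, findDB]
      by_cases hm : pvMatchAt cs i
      · simp [hi, hm]
      · simp only [hi, if_true, hm, Bool.false_eq_true, if_false]
        exact ih (i + 1) ins sc start acc (by omega)
    · rw [scanB, findDB]; simp [hi]

-- basic facts about where the inner loop stops
theorem innerA_some (cs : List Char) : ∀ (k j : Nat) (bc : Int) (ins : Bool) (sc : Char)
    (jc : Nat), cs.length - j ≤ k → innerA cs j bc ins sc = some jc →
    j ≤ jc ∧ jc < cs.length ∧ cs.getD jc ' ' = '}' := by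
  intro k
  induction k with
  | zero =>
    intro j bc ins sc jc hk h
    have hj : ¬ j < cs.length := by omega
    rw [innerA] at h; simp [hj] at h
  | succ k ih =>
    intro j bc ins sc jc hk h
    by_cases hj : j < cs.length
    · rw [innerA, if_pos hj] at h
      cases ins with
      | false =>
        rw [if_pos rfl] at h
        by_cases hq : cs.getD j ' ' = '"' ∨ cs.getD j ' ' = '\'' ∨ cs.getD j ' ' = '`'
        · rw [if_pos hq] at h
          have H := ih (j + 1) bc true (cs.getD j ' ') jc (by omega) h
          exact ⟨by omega, H.2.1, H.2.2⟩
        · rw [if_neg hq] at h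
          by_cases hob : cs.getD j ' ' = '{'
          · rw [if_pos hob] at h
            have H := ih (j + 1) (bc + 1) false sc jc (by omega) h
            exact ⟨by omega, H.2.1, H.2.2⟩
          · rw [if_neg hob] at h
            by_cases hcb : cs.getD j ' ' = '}'
            · rw [if_pos hcb] at h
              by_cases hbc : bc - 1 = 0
              · rw [if_pos hbc] at h
                have : j = jc := by injection h
                subst this
                exact ⟨le_rfl, hj, hcb⟩
              · rw [if_neg hbc] at h
                have H := ih (j + 1) (bc - 1) false sc jc (by omega) h
                exact ⟨by omega, H.2.1, H.2.2⟩
            · rw [if_neg hcb] at h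
              have H := ih (j + 1) bc false sc jc (by omega) h
              exact ⟨by omega, H.2.1, H.2.2⟩
      | true =>
        rw [if_neg (show ¬ (true = false) by decide)] at h
        by_cases hesc : cs.getD j ' ' = sc ∧ cs.getD (j - 1) ' ' ≠ '\\'
        · rw [if_pos hesc] at h
          have H := ih (j + 1) bc false sc jc (by omega) h
          exact ⟨by omega, H.2.1, H.2.2⟩
        · rw [if_neg hesc] at h
          have H := ih (j + 1) bc true sc jc (by omega) h
          exact ⟨by omega, H.2.1, H.2.2⟩
    · rw [innerA] at h; simp [hj] at h

-- inside phase: B's scan at depth = bc mirrors A's inner loop step for step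
-- (scA/scB may differ while in_string is false — both are dead state there)
theorem scanB_inner (cs : List Char) : ∀ (k j : Nat) (bc : Int) (ins : Bool) (scA scB : Char)
    (start : Nat) (acc : List (Int × Int × String)), cs.length - j ≤ k → 1 ≤ bc →
    (ins = true → scA = scB) →
    (innerA cs j bc ins scA = none → scanB cs j bc ins scB start acc = acc) ∧
    (∀ jc, innerA cs j bc ins scA = some jc → ∃ sc',
      scanB cs j bc ins scB start acc =
        scanB cs (jc + 1) 0 false sc' start
          (acc ++ [((start : Int), ((jc + 1 : Nat) : Int), pvSlice cs start (jc + 1))])) := by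
  intro k
  induction k with
  | zero =>
    intro j bc ins scA scB start acc hk hbc hsc
    have hj : ¬ j < cs.length := by omega
    constructor
    · intro _; rw [scanB, if_neg hj]
    · intro jc h; rw [innerA, if_neg hj] at h; simp at h
  | succ k ih =>
    intro j bc ins scA scB start acc hk hbc hsc
    by_cases hj : j < cs.length
    · have hd0 : ¬ (bc = 0) := by omega
      cases ins with
      | true =>
        have hscEq : scA = scB := hsc rfl
        subst hscEq
        by_cases hesc : cs.getD j ' ' = scA ∧ cs.getD (j - 1) ' ' ≠ '\\'
        · have step : scanB cs j bc true scA start acc = scanB cs (j + 1) bc false scA start acc := by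
            rw [scanB, if_pos hj, if_neg hd0, if_pos rfl, if_pos hesc]
          have stepA : innerA cs j bc true scA = innerA cs (j + 1) bc false scA := by
            rw [innerA, if_pos hj, if_neg (show ¬ (true = false) by decide), if_pos hesc]
          have h2 := ih (j + 1) bc false scA scA start acc (by omega) hbc
            (fun h => absurd h (by decide))
          exact ⟨fun h => by rw [step]; exact h2.1 (by rw [← stepA]; exact h),
                 fun jc h => by rw [step]; exact h2.2 jc (by rw [← stepA]; exact h)⟩
        · have step : scanB cs j bc true scA start acc = scanB cs (j + 1) bc true scA start acc := by
            rw [scanB, if_pos hj, if_neg hd0, if_pos rfl, if_neg hesc]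
          have stepA : innerA cs j bc true scA = innerA cs (j + 1) bc true scA := by
            rw [innerA, if_pos hj, if_neg (show ¬ (true = false) by decide), if_neg hesc]
          have h2 := ih (j + 1) bc true scA scA start acc (by omega) hbc (fun _ => rfl)
          exact ⟨fun h => by rw [step]; exact h2.1 (by rw [← stepA]; exact h),
                 fun jc h => by rw [step]; exact h2.2 jc (by rw [← stepA]; exact h)⟩
      | false =>
        by_cases hq : cs.getD j ' ' = '"' ∨ cs.getD j ' ' = '\'' ∨ cs.getD j ' ' = '`'
        · have step : scanB cs j bc false scB start acc =
              scanB cs (j + 1) bc true (cs.getD j ' ') start acc := by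
            rw [scanB, if_pos hj, if_neg hd0, if_neg (show ¬ (false = true) by decide), if_pos hq]
          have stepA : innerA cs j bc false scA = innerA cs (j + 1) bc true (cs.getD j ' ') := by
            rw [innerA, if_pos hj, if_pos rfl, if_pos hq]
          have h2 := ih (j + 1) bc true (cs.getD j ' ') (cs.getD j ' ') start acc (by omega) hbc
            (fun _ => rfl)
          exact ⟨fun h => by rw [step]; exact h2.1 (by rw [← stepA]; exact h),
                 fun jc h => by rw [step]; exact h2.2 jc (by rw [← stepA]; exact h)⟩
        · by_cases hob : cs.getD j ' ' = '{'
          · have step : scanB cs j bc false scB start acc =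
                scanB cs (j + 1) (bc + 1) false scB start acc := by
              rw [scanB, if_pos hj, if_neg hd0, if_neg (show ¬ (false = true) by decide),
                if_neg hq, if_pos hob]
            have stepA : innerA cs j bc false scA = innerA cs (j + 1) (bc + 1) false scA := by
              rw [innerA, if_pos hj, if_pos rfl, if_neg hq, if_pos hob]
            have h2 := ih (j + 1) (bc + 1) false scA scB start acc (by omega) (by omega)
              (fun h => absurd h (by decide))
            exact ⟨fun h => by rw [step]; exact h2.1 (by rw [← stepA]; exact h),
                   fun jc h => by rw [step]; exact h2.2 jc (by rw [← stepA]; exact h)⟩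
          · by_cases hcb : cs.getD j ' ' = '}'
            · by_cases hbc1 : bc - 1 = 0
              · -- emission: both stop here
                have hAe : innerA cs j bc false scA = some j := by
                  rw [innerA, if_pos hj, if_pos rfl, if_neg hq, if_neg hob, if_pos hcb,
                    if_pos hbc1]
                have hBe : scanB cs j bc false scB start acc =
                    scanB cs (j + 1) 0 false scB start
                      (acc ++ [((start : Int), ((j + 1 : Nat) : Int), pvSlice cs start (j + 1))]) := by
                  rw [scanB, if_pos hj, if_neg hd0, if_neg (show ¬ (false = true) by decide),
                    if_neg hq, if_neg hob, if_pos hcb, if_pos hbc1]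
                refine ⟨fun h => by rw [hAe] at h; simp at h, ?_⟩
                intro jc h
                rw [hAe] at h
                have : j = jc := by injection h
                subst this
                exact ⟨scB, hBe⟩
              · have step : scanB cs j bc false scB start acc =
                    scanB cs (j + 1) (bc - 1) false scB start acc := by
                  rw [scanB, if_pos hj, if_neg hd0, if_neg (show ¬ (false = true) by decide),
                    if_neg hq, if_neg hob, if_pos hcb, if_neg hbc1]
                have stepA : innerA cs j bc false scA = innerA cs (j + 1) (bc - 1) false scA := by
                  rw [innerA, if_pos hj, if_pos rfl, if_neg hq, if_neg hob, if_pos hcb,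
                    if_neg hbc1]
                have h2 := ih (j + 1) (bc - 1) false scA scB start acc (by omega) (by omega)
                  (fun h => absurd h (by decide))
                exact ⟨fun h => by rw [step]; exact h2.1 (by rw [← stepA]; exact h),
                       fun jc h => by rw [step]; exact h2.2 jc (by rw [← stepA]; exact h)⟩
            · have step : scanB cs j bc false scB start acc =
                  scanB cs (j + 1) bc false scB start acc := by
                rw [scanB, if_pos hj, if_neg hd0, if_neg (show ¬ (false = true) by decide),
                  if_neg hq, if_neg hob, if_neg hcb]
              have stepA : innerA cs j bc false scA = innerA cs (j + 1) bc false scA := by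
                rw [innerA, if_pos hj, if_pos rfl, if_neg hq, if_neg hob, if_neg hcb]
              have h2 := ih (j + 1) bc false scA scB start acc (by omega) hbc
                (fun h => absurd h (by decide))
              exact ⟨fun h => by rw [step]; exact h2.1 (by rw [← stepA]; exact h),
                     fun jc h => by rw [step]; exact h2.2 jc (by rw [← stepA]; exact h)⟩
    · constructor
      · intro _; rw [scanB, if_neg hj]
      · intro jc h; rw [innerA, if_neg hj] at h; simp at h

-- main correspondence: A's outer loop = B's scan at depth 0, for every dead state (ins, sc, start)
theorem outerA_eq_scanB (cs : List Char) : ∀ (k i : Nat) (ins : Bool) (sc : Char) (start : Nat)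
    (acc : List (Int × Int × String)), cs.length - i ≤ k →
    outerA cs i acc = scanB cs i 0 ins sc start acc := by
  intro k
  induction k with
  | zero =>
    intro i ins sc start acc hk
    have hi : ¬ i < cs.length := by omega
    rw [outerA, scanB]; simp [hi]
  | succ k ih =>
    intro i ins sc start acc hk
    by_cases hi : i < cs.length
    · rw [scanB_zero cs (cs.length - i) i ins sc start acc le_rfl, outerA, if_pos hi]
      split
      · rename_i heq
        rw [heq]
      · rename_i idx hidx
        have hidxge : i ≤ idx := findDB_ge cs (cs.length - i) i idx le_rfl hidx
        have hRHS : (match findDB cs i with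
            | none => acc
            | some idx => scanB cs (idx + 2) 1 false sc idx acc) =
            scanB cs (idx + 2) 1 false sc idx acc := by rw [hidx]
        rw [hRHS]
        split
        · rename_i jc hinner
          obtain ⟨hle, hlt, hch⟩ := innerA_some cs (cs.length - (idx + 2)) (idx + 2) 1 false ' ' jc
            le_rfl hinner
          obtain ⟨sc', hB⟩ := (scanB_inner cs (cs.length - (idx + 2)) (idx + 2) 1 false ' ' sc idx
            acc le_rfl (by omega) (fun h => absurd h (by decide))).2 jc hinner
          rw [hB]
          have hmax : max (idx + 1) jc = jc := by omega
          rw [hmax]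
          have hnm : ¬ (pvMatchAt cs jc = true) := by
            unfold pvMatchAt
            simp only [Bool.and_eq_true, beq_iff_eq]
            rintro ⟨⟨h1, h2⟩, h3⟩
            rw [hch] at h1
            exact absurd h1 (by decide)
          have hstep : scanB cs jc 0 false sc' idx
              (acc ++ [((idx : Int), ((jc + 1 : Nat) : Int), pvSlice cs idx (jc + 1))]) =
              scanB cs (jc + 1) 0 false sc' idx
              (acc ++ [((idx : Int), ((jc + 1 : Nat) : Int), pvSlice cs idx (jc + 1))]) := by
            rw [scanB, if_pos hlt, if_pos rfl, if_neg hnm]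
          rw [← hstep]
          exact ih jc false sc' idx _ (by omega)
        · rename_i hinner
          have hB := (scanB_inner cs (cs.length - (idx + 2)) (idx + 2) 1 false ' ' sc idx acc
            le_rfl (by omega) (fun h => absurd h (by decide))).1 hinner
          rw [hB, outerA, if_neg (show ¬ max (idx + 1) cs.length < cs.length by omega)]
    · rw [outerA, scanB]; simp [hi]

-- ===== VERDICT (by name: the statement is the Claim_ definition above) =====
theorem find_templates_spec : Claim_equal_find_templates := by
  intro text _
  unfold Spec_find_templates find_templates find_templates_alt
  exact outerA_eq_scanB text.toList text.toList.length 0 false ' ' 0 [] le_rfl
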